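-- pv_equiv track=rewrite | github.com/Samuel-BlankAmber/compression-resistant-steganography | decode.py | decode_pixel_data
-- ===== SOURCE A (Python) =====
-- from collections import Counter
--
-- def get_encoded_data(pixel):
--     return "".join("1" if colour > 128 else "0" for colour in pixel)
--
-- def determine_colour_size(width, _height, pixel_data):
--     first_row = pixel_data[:width]
--     num_sames = []
--     num_same = 1
--     for pixel, prev_pixel in zip(first_row[1:], first_row):
--         if get_encoded_data(pixel) == get_encoded_data(prev_pixel):
--             num_same += 1
--             continue
--         num_sames.append(num_same)
--         num_same = 1
--     return Counter(num_sames).most_common(1)[0][0]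
--
-- def decode_pixel_data(width, height, pixel_data):
--     colour_size = determine_colour_size(width, height, pixel_data)
--
--     encoded_data = ""
--     for y in range(colour_size // 2, height, colour_size):
--         for x in range(colour_size // 2, width, colour_size):
--             pixel = pixel_data[y * width + x]
--             encoded_data += get_encoded_data(pixel)
--
--     message = ""
--     for i in range(0, len(encoded_data), 8):
--         byte = int(encoded_data[i:i + 8], 2)
--         if byte == 0:
--             break
--         message += chr(byte)
--     return message
-- ===== SOURCE B (Python) =====
-- from collections import Counter
--
-- def get_encoded_data(pixel):
--     return "".join("1" if colour > 128 else "0" for colour in pixel)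
--
-- def determine_colour_size(width, _height, pixel_data):
--     first_row = pixel_data[:width]
--     num_sames = []
--     num_same = 1
--     for pixel, prev_pixel in zip(first_row[1:], first_row):
--         if get_encoded_data(pixel) == get_encoded_data(prev_pixel):
--             num_same += 1
--             continue
--         num_sames.append(num_same)
--         num_same = 1
--     return Counter(num_sames).most_common(1)[0][0]
--
-- def decode_pixel_data(width, height, pixel_data):
--     colour_size = determine_colour_size(width, height, pixel_data)
--     half = colour_size // 2
--
--     message = []
--     buf = ""
--     stop = False
--     for y in range(half, height, colour_size):
--         if stop:
--             break
--         for x in range(half, width, colour_size):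
--             if stop:
--                 break
--             buf += get_encoded_data(pixel_data[y * width + x])
--             while len(buf) >= 8:
--                 byte = int(buf[:8], 2)
--                 buf = buf[8:]
--                 if byte == 0:
--                     stop = True
--                     break
--                 message.append(chr(byte))
--     if not stop and buf:
--         byte = int(buf, 2)
--         if byte != 0:
--             message.append(chr(byte))
--     return "".join(message)
-- ===== Notes on version B (the rewrite author's own statement) =====
-- stated objective: alternative
-- what changed: decode_pixel_data now makes a single pass over the sampled grid, streaming each pixel's bits through an 8-bit buffer and decoding/stopping on the fly, instead of A's two passes (build the full bit string, then chunk it into bytes); the helpers are kept unchanged.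
-- outside the precondition, e.g. on decode_pixel_data(3, 3, [(0,), (0,), (200,), (0,), (200,)]): A returns '\x01', B returns '\x01'
import Mathlib
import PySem

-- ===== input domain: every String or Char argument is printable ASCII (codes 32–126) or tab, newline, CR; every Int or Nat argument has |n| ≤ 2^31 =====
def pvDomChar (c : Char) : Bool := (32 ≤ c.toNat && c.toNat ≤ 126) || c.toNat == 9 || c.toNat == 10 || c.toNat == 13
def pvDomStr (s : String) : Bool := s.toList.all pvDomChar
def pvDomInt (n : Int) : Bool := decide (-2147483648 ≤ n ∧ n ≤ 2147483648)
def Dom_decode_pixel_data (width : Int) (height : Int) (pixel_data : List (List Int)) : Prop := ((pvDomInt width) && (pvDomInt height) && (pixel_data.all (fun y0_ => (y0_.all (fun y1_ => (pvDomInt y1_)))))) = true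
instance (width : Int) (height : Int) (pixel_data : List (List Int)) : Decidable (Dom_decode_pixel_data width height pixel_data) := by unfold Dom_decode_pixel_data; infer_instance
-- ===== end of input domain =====

-- B streams the sampled pixel bits through an 8-bit buffer, decoding bytes and stopping as it goes,
-- instead of A's two passes (build the whole bit string, then chunk it); objective: alternative decomposition, same cost.

-- ===== PORT A =====
-- get_encoded_data as a List Char (the String is built at the end of decode_pixel_data)
def pvEnc (pixel : List Int) : List Char := pixel.map (fun colour => if 128 < colour then '1' else '0')

-- int(s, 2): exact for strings of '0'/'1' characters, the only strings fed to it here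
def pvBinVal (bits : List Char) : Int := bits.foldl (fun a c => 2 * a + (if c = '1' then 1 else 0)) 0

-- Counter(xs).most_common(1)[0][0]: the first-inserted key with maximal count (heapq.nlargest(1) = max in
-- iteration order); none when the counter is empty (Python raises IndexError there — excluded by Pre_)
def pvMostCommon1 (d : PySem.Dict Int Int) : Option Int :=
  (d.items.foldl (fun (best : Option (Int × Int)) kv =>
      match best with
      | none => some kv
      | some b => if b.2 < kv.2 then some kv else some b) none).map (·.1)

-- determine_colour_size, shared verbatim by A and B (Source B keeps this helper unchanged)
def pvDetermineColourSize (width : Int) (_height : Int) (pixel_data : List (List Int)) : Option Int :=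
  let first_row := PySem.List.slice pixel_data none (some width)
  let pairs := (first_row.drop 1).zip first_row
  let st := pairs.foldl (fun (st : List Int × Int) pp =>
      if pvEnc pp.1 = pvEnc pp.2 then (st.1, st.2 + 1) else (st.1 ++ [st.2], 1)) ([], 1)
  pvMostCommon1 (PySem.Dict.counter st.1)

-- the message loop: for i in range(0, len, 8): byte = int(s[i:i+8], 2); break on 0 else append chr(byte)
def pvDecodeA (bits : List Char) : List Char :=
  if h : bits = [] then []
  else
    let byte := pvBinVal (bits.take 8)
    if byte = 0 then [] else Char.ofNat byte.toNat :: pvDecodeA (bits.drop 8)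
termination_by bits.length
decreasing_by simp [List.length_drop]; exact List.length_pos_iff.mpr h

def decode_pixel_data (width : Int) (height : Int) (pixel_data : List (List Int)) : String :=
  -- .getD 1 stands for the IndexError Python raises when the counter is empty; Pre_ excludes that
  let colour_size := (pvDetermineColourSize width height pixel_data).getD 1
  let half := PySem.Int.floordiv colour_size 2
  let encoded_data := (PySem.List.pyRange half height colour_size).foldl (fun acc y =>
      (PySem.List.pyRange half width colour_size).foldl
        (fun acc x => acc ++ pvEnc ((PySem.List.pyGet? pixel_data (y * width + x)).getD [])) acc)
    ([] : List Char)
  String.ofList (pvDecodeA encoded_data)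

-- ===== PORT B =====
structure PvSt where
  msg : List Char
  buf : List Char
  stop : Bool
deriving Repr, DecidableEq

-- the 'while len(buf) >= 8' loop of Source B
def pvConsume (msg buf : List Char) : PvSt :=
  if 8 ≤ buf.length then
    let byte := pvBinVal (buf.take 8)
    if byte = 0 then ⟨msg, buf.drop 8, true⟩
    else pvConsume (msg ++ [Char.ofNat byte.toNat]) (buf.drop 8)
  else ⟨msg, buf, false⟩
termination_by buf.length
decreasing_by simp [List.length_drop]; omega

-- one grid pixel's bits fed into the state ('if stop: break' = identity once stopped)
def pvStep (s : PvSt) (p : List Char) : PvSt :=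
  if s.stop then s else pvConsume s.msg (s.buf ++ p)

-- the trailing 'if not stop and buf' block
def pvFlush (s : PvSt) : List Char :=
  if s.stop then s.msg
  else if s.buf = [] then s.msg
  else if pvBinVal s.buf = 0 then s.msg else s.msg ++ [Char.ofNat (pvBinVal s.buf).toNat]

def decode_pixel_data_alt (width : Int) (height : Int) (pixel_data : List (List Int)) : String :=
  let colour_size := (pvDetermineColourSize width height pixel_data).getD 1
  let half := PySem.Int.floordiv colour_size 2
  let s := (PySem.List.pyRange half height colour_size).foldl (fun s y =>
      (PySem.List.pyRange half width colour_size).foldl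
        (fun s x => pvStep s (pvEnc ((PySem.List.pyGet? pixel_data (y * width + x)).getD []))) s)
    (⟨[], [], false⟩ : PvSt)
  String.ofList (pvFlush s)

-- ===== PRECONDITION & SPEC =====
-- Pre_ excludes (i) inputs whose first row has no two adjacent pixels with different encoded bits, on which
-- Python A raises IndexError in determine_colour_size, and (ii) positive-dimension grids with fewer than
-- height*width pixels, on which the sampling loop raises IndexError (this bound is the simple sufficient
-- one, so it also excludes some short pixel_data on which A's sparse sampling stays in range and returns).
def Pre_decode_pixel_data (width : Int) (height : Int) (pixel_data : List (List Int)) : Prop :=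
  (∃ pp ∈ ((PySem.List.slice pixel_data none (some width)).drop 1).zip (PySem.List.slice pixel_data none (some width)), pvEnc pp.1 ≠ pvEnc pp.2)
  ∧ (0 < width → 0 < height → height * width ≤ pixel_data.length)
instance (width : Int) (height : Int) (pixel_data : List (List Int)) : Decidable (Pre_decode_pixel_data width height pixel_data) := by unfold Pre_decode_pixel_data; infer_instance

def pvWitness_decode_pixel_data : Int × Int × List (List Int) := (2, 1, [[0], [200]])

def Spec_decode_pixel_data (width : Int) (height : Int) (pixel_data : List (List Int)) (out : String) : Prop := out = decode_pixel_data_alt width height pixel_data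
instance (width : Int) (height : Int) (pixel_data : List (List Int)) (out : String) : Decidable (Spec_decode_pixel_data width height pixel_data out) := by unfold Spec_decode_pixel_data; infer_instance

-- ===== CLAIM (what is proved, stated in full; the proofs are below) =====
def Claim_equal_decode_pixel_data : Prop := ∀ (width : Int) (height : Int) (pixel_data : List (List Int)), Dom_decode_pixel_data width height pixel_data → Pre_decode_pixel_data width height pixel_data → Spec_decode_pixel_data width height pixel_data (decode_pixel_data width height pixel_data)

-- ===== LEMMAS AND PROOFS =====

theorem pvFlush_consume (b m : List Char) : pvFlush (pvConsume m b) = m ++ pvDecodeA b := by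
  fun_induction pvConsume m b with
  | case1 m b hlen byte h0 =>
    rw [pvDecodeA]
    have hb : b ≠ [] := by intro h; subst h; simp at hlen
    simp only [byte] at h0
    simp [pvFlush, hb, h0]
  | case2 m b hlen byte h0 ih =>
    rw [pvDecodeA]
    have hb : b ≠ [] := by intro h; subst h; simp at hlen
    simp only [byte] at h0 ih ⊢
    simp [hb, h0, ih]
  | case3 m b hlen =>
    by_cases hb : b = []
    · subst hb; simp [pvFlush, pvDecodeA]
    · rw [pvDecodeA]
      have ht : b.take 8 = b := List.take_of_length_le (by omega)
      have hd : b.drop 8 = [] := List.drop_eq_nil_of_le (by omega)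
      by_cases h0 : pvBinVal b = 0 <;> simp [pvFlush, hb, ht, hd, h0, pvDecodeA]
theorem pvConsume_append (b m t : List Char) :
    pvConsume m (b ++ t) =
      if (pvConsume m b).stop then ⟨(pvConsume m b).msg, (pvConsume m b).buf ++ t, true⟩
      else pvConsume (pvConsume m b).msg ((pvConsume m b).buf ++ t) := by
  fun_induction pvConsume m b with
  | case1 m b hlen byte h0 =>
    simp only [byte] at h0
    have h1 : 8 ≤ (b ++ t).length := by simp; omega
    have h2 : (b ++ t).take 8 = b.take 8 := List.take_append_of_le_length hlen
    have h3 : (b ++ t).drop 8 = b.drop 8 ++ t := List.drop_append_of_le_length hlen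
    rw [pvConsume]
    simp [h2, h3, h0]
    omega
  | case2 m b hlen byte h0 ih =>
    simp only [byte] at h0 ih
    have h1 : 8 ≤ (b ++ t).length := by simp; omega
    have h2 : (b ++ t).take 8 = b.take 8 := List.take_append_of_le_length hlen
    have h3 : (b ++ t).drop 8 = b.drop 8 ++ t := List.drop_append_of_le_length hlen
    rw [pvConsume]
    simp only [h1, if_true, h2, h0, if_false, h3]
    exact ih
  | case3 m b hlen =>
    simp
theorem pvStep_stopped (s : PvSt) (h : s.stop = true) (p : List Char) : pvStep s p = s := by
  simp [pvStep, h]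

theorem pvFoldl_stopped (s : PvSt) (h : s.stop = true) (ps : List (List Char)) :
    List.foldl pvStep s ps = s := by
  induction ps with
  | nil => rfl
  | cons p ps ih => simp [List.foldl, pvStep_stopped s h, ih]

theorem pvMain (ps : List (List Char)) : ∀ (b m : List Char),
    pvFlush (List.foldl pvStep (pvConsume m b) ps) = m ++ pvDecodeA (b ++ ps.flatten) := by
  induction ps with
  | nil => intro b m; simpa using pvFlush_consume b m
  | cons p ps ih =>
    intro b m
    by_cases h : (pvConsume m b).stop
    · rw [pvFoldl_stopped _ h]
      have key := pvConsume_append b m (p ++ ps.flatten)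
      rw [if_pos h] at key
      have f1 := pvFlush_consume (b ++ (p ++ ps.flatten)) m
      rw [key] at f1
      simp only [pvFlush, h] at f1 ⊢
      simp at f1 ⊢
      rw [← List.append_assoc] at f1
      rw [f1, List.append_assoc]
    · simp only [Bool.not_eq_true] at h
      have hstep : pvStep (pvConsume m b) p = pvConsume (pvConsume m b).msg ((pvConsume m b).buf ++ p) := by
        simp [pvStep, h]
      rw [List.foldl_cons, hstep, ih]
      have key := pvConsume_append b m (p ++ ps.flatten)
      rw [if_neg (by simp [h])] at key
      have f1 := pvFlush_consume (b ++ (p ++ ps.flatten)) m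
      have f2 := pvFlush_consume ((pvConsume m b).buf ++ (p ++ ps.flatten)) (pvConsume m b).msg
      rw [key, f2] at f1
      simp only [List.flatten_cons, ← List.append_assoc] at f1 ⊢
      rw [← f1]
theorem pvFoldl_flatMap (g : Int → List (List Char)) (l : List Int) : ∀ (s : PvSt),
    List.foldl pvStep s (l.flatMap g) = List.foldl (fun s y => List.foldl pvStep s (g y)) s l := by
  induction l with
  | nil => intro s; simp
  | cons y l ih => intro s; simp [List.foldl_append, ih]

theorem pvNested_eq (yR xR : List Int) (f : Int → Int → List Char) :
    String.ofList (pvDecodeA (yR.foldl (fun acc y => xR.foldl (fun acc x => acc ++ f y x) acc) [])) =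
    String.ofList (pvFlush (yR.foldl (fun s y => xR.foldl (fun s x => pvStep s (f y x)) s) ⟨[], [], false⟩)) := by
  have hA : yR.foldl (fun acc y => xR.foldl (fun acc x => acc ++ f y x) acc) ([] : List Char)
      = (yR.flatMap (fun y => xR.map (f y))).flatten := by
    rw [show (fun acc y => xR.foldl (fun acc x => acc ++ f y x) acc)
        = (fun (acc : List Char) y => acc ++ xR.flatMap (f y)) from
      funext fun acc => funext fun y => PySem.List.foldl_append_eq_flatMap _ _ _]
    rw [PySem.List.foldl_append_eq_flatMap]
    induction yR with
    | nil => simp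
    | cons y yR ih => simp_all [List.flatMap_def]
  have hB : yR.foldl (fun s y => xR.foldl (fun s x => pvStep s (f y x)) s) (⟨[], [], false⟩ : PvSt)
      = List.foldl pvStep ⟨[], [], false⟩ (yR.flatMap (fun y => xR.map (f y))) := by
    rw [pvFoldl_flatMap]
    congr 1
    funext s y
    rw [List.foldl_map]
  have hc : pvConsume [] [] = ⟨[], [], false⟩ := by rw [pvConsume]; simp
  have hm := pvMain (yR.flatMap (fun y => xR.map (f y))) [] []
  rw [hc] at hm
  simp only [List.nil_append] at hm
  rw [hA, hB, ← hm]

-- ===== VERDICT (by name: the statement is the Claim_ definition above) =====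
theorem decode_pixel_data_spec : Claim_equal_decode_pixel_data := by
  intro width height pixel_data _ _
  unfold Spec_decode_pixel_data decode_pixel_data decode_pixel_data_alt
  exact pvNested_eq
    (PySem.List.pyRange (PySem.Int.floordiv ((pvDetermineColourSize width height pixel_data).getD 1) 2) height ((pvDetermineColourSize width height pixel_data).getD 1))
    (PySem.List.pyRange (PySem.Int.floordiv ((pvDetermineColourSize width height pixel_data).getD 1) 2) width ((pvDetermineColourSize width height pixel_data).getD 1))
    (fun y x => pvEnc ((PySem.List.pyGet? pixel_data (y * width + x)).getD []))
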